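-- pv_equiv track=rewrite | github.com/WolfDanny/Homeostatic_Competition | FS-absorption-probability.py | levelStates
-- ===== SOURCE A (Python) =====
-- def isAbsorbed(state):
--     """
--     Checks if a state has been absorbed.
--
--     Parameters
--     ----------
--     state : list
--         List of number of cells per clonotype.
--
--     Returns
--     -------
--     bool
--         True if any component of state is 0, False otherwise.
--
--     """
--
--
--     for i in range(len(state)):
--         if state[i]<=0:
--             return True
--
--     return False
--
-- def isInLevel(state,level,dimension):
--     """
--     Determines if a state is part of a level.
--
--     Parameters
--     ----------
--     state : list
--         List of number of cells per clonotype.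
--     level : int
--         Level of the state space.
--     dimension : int
--         Number of clonotypes.
--
--     Returns
--     -------
--     bool
--         True if state is part of level, False otherwise..
--
--     """
--
--     if len(state)!=dimension or sum(state)!=level or isAbsorbed(state):
--         return False
--     else:
--         return True
--
-- def levelStates(level,dimension):
--     """
--     Creates a list of all states in level.
--
--     Parameters
--     ----------
--     level : int
--         Level of the state space.
--     dimension : int
--         Number of clonotypes.
--
--     Returns
--     -------
--     levelStates : list
--         List of all states in level.
--
--     """
--
--     levelStates = []
--     n = [1 for _ in range(dimension)]
--
--     while True:
--
--         if isInLevel(n, level, dimension):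
--             levelStates.append(n[:])
--
--         n[0] += 1
--         for i in range(len(n)):
--             if n[i] > level - dimension + 1:
--                 if (i + 1) < len(n):
--                     n[i+1] += 1
--                     n[i] = 1
--                 for j in range(i):
--                     n[j] = 1
--
--         if n[-1] > level - dimension + 1:
--             break
--
--     return levelStates
-- ===== SOURCE B (Python) =====
-- def levelStates(level, dimension):
--     """Directly generate the positive compositions of `level` into `dimension`
--     parts, in the same order A's odometer visits them (first coordinate fastest)."""
--
--     def comps(total, parts):
--         if parts == 1:
--             return [[total]] if total >= 1 else []
--         return [c + [k]
--                 for k in range(1, total - parts + 2)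
--                 for c in comps(total - k, parts - 1)]
--
--     return comps(level, dimension)
-- ===== Notes on version B (the rewrite author's own statement) =====
-- stated objective: faster
-- what changed: A scans the whole box [1..level-dimension+1]^dimension with an odometer and filters tuples summing to level; B generates exactly the positive compositions recursively (choosing the last part and recursing on the remainder), producing them directly in A's visiting order.
import Mathlib
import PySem

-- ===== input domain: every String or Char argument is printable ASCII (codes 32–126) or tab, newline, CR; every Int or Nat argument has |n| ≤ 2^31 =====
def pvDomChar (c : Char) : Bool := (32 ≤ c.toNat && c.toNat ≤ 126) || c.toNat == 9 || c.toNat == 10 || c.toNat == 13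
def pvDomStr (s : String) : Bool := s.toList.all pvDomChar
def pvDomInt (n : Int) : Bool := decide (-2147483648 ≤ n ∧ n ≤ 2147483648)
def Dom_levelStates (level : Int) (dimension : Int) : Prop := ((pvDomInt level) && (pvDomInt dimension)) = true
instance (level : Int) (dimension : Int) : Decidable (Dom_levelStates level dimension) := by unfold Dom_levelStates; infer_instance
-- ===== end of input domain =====

-- B replaces A's odometer scan of the whole box [1..level-dimension+1]^dimension (filtering the
-- tuples that sum to level) by a direct recursive generation of exactly the positive
-- compositions of level into dimension parts, in the same order A emits them.

-- ===== PORT A =====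
def isAbsorbedA : List Int → Bool
  | [] => false
  | x :: r => if x ≤ 0 then true else isAbsorbedA r

def isInLevelA (state : List Int) (level : Int) (dimension : Int) : Bool :=
  if ((state.length : Int) != dimension) || (state.sum != level) || isAbsorbedA state then
    false
  else
    true

-- the inner `for i in range(len(n))` loop of A (len(n) is read once, as in Python; the body
-- keeps the list length invariant, so `getD i 0` is exactly Python's n[i] for i < len)
def carryGo (M : Int) (len : Nat) (i : Nat) (m : List Int) : List Int :=
  if i < len then
    carryGo M len (i + 1)
      (if m.getD i 0 > M then
        List.replicate i 1 ++
          ((if i + 1 < len then (m.set (i + 1) (m.getD (i + 1) 0 + 1)).set i 1 else m).drop i)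
      else m)
  else m
termination_by len - i

-- the `while True:` loop of A; the fuel supplied by levelStates is proved sufficient below,
-- so the 0-fuel branch is never reached on inputs satisfying Pre_
def loopA (level : Int) (dimension : Int) : Nat → List Int → List (List Int) → List (List Int)
  | 0, _, acc => acc
  | f + 1, n, acc =>
    let acc' := if isInLevelA n level dimension then acc ++ [n] else acc
    let n1 := match n with                        -- n[0] += 1 (IndexError on [], outside Pre_)
      | [] => []
      | x :: r => (x + 1) :: r
    let n2 := carryGo (level - dimension + 1) n1.length 0 n1
    if n2.getLastD 0 > level - dimension + 1 then acc'
    else loopA level dimension f n2 acc'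

def levelStates (level : Int) (dimension : Int) : List (List Int) :=
  loopA level dimension ((level - dimension + 1).toNat ^ dimension.toNat + 1)
    (List.replicate dimension.toNat 1) []

-- ===== PORT B =====
-- comps(total, parts) of Source B; parts is carried as a Nat (Pre_ gives dimension ≥ 1 and the
-- recursion only ever steps parts down to 1, so the 0 case is unreachable)
def comps (total : Int) : Nat → List (List Int)
  | 0 => []
  | 1 => if 1 ≤ total then [[total]] else []
  | p + 2 =>
    (PySem.List.pyRange 1 (total - ((p : Int) + 2) + 2)).flatMap
      (fun k => (comps (total - k) (p + 1)).map (fun c => c ++ [k]))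

def levelStates_alt (level : Int) (dimension : Int) : List (List Int) :=
  comps level dimension.toNat

-- ===== PRECONDITION & SPEC =====
-- Pre_ excludes only dimension ≤ 0, where A raises IndexError (n[0] += 1 on the empty list)
def Pre_levelStates (level : Int) (dimension : Int) : Prop := 1 ≤ dimension
instance (level : Int) (dimension : Int) : Decidable (Pre_levelStates level dimension) := by
  unfold Pre_levelStates; infer_instance

def pvWitness_levelStates : Int × Int := (5, 3)

def Spec_levelStates (level : Int) (dimension : Int) (out : List (List Int)) : Prop := out = levelStates_alt level dimension
instance (level : Int) (dimension : Int) (out : List (List Int)) : Decidable (Spec_levelStates level dimension out) := by unfold Spec_levelStates; infer_instance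

-- ===== CLAIM (what is proved, stated in full; the proofs are below) =====
def Claim_equal_levelStates : Prop := ∀ (level : Int) (dimension : Int), Dom_levelStates level dimension → Pre_levelStates level dimension → Spec_levelStates level dimension (levelStates level dimension)

-- ===== LEMMAS AND PROOFS =====

-- all tuples of [1..M]^d in A's visiting order (first coordinate fastest)
def tup (M : Int) : Nat → List (List Int)
  | 0 => [[]]
  | d + 1 => (List.range M.toNat).flatMap (fun (q : Nat) => (tup M d).map (fun t => t ++ [(q : Int) + 1]))

-- decode a counter value into d digits (little-endian, digits 1..M)
def dec (M : Int) : Nat → Nat → List Int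
  | 0, _ => []
  | d + 1, j => (((j % M.toNat : Nat) : Int) + 1) :: dec M d (j / M.toNat)

-- encode a digit tuple back into its counter value
def encT (M : Int) : List Int → Nat
  | [] => 0
  | x :: r => (x - 1).toNat + M.toNat * encT M r

-- abstract form of A's carry scan acting on the suffix from the current position
def propC (M : Int) : List Int → List Int
  | [] => []
  | [x] => [x]
  | x :: y :: r => if x > M then 1 :: propC M ((y + 1) :: r) else x :: y :: r
termination_by t => t.length

def okT (M : Int) (t : List Int) : Prop := ∀ x ∈ t, 1 ≤ x ∧ x ≤ M

lemma dec_length (M : Int) (d : Nat) : ∀ j, (dec M d j).length = d := by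
  induction d with
  | zero => intro j; rfl
  | succ d ih => intro j; simp [dec, ih]

lemma dec_ok {M : Int} (hM : 1 ≤ M) (d j : Nat) : okT M (dec M d j) := by
  induction d generalizing j with
  | zero => intro x hx; simp [dec] at hx
  | succ d ih =>
    intro x hx
    have hm : 0 < M.toNat := by omega
    rcases List.mem_cons.mp hx with h | h
    · subst h
      have := Nat.mod_lt j hm
      omega
    · exact ih _ x h

lemma dec_zero {M : Int} (hM : 1 ≤ M) (d : Nat) : dec M d 0 = List.replicate d 1 := by
  induction d with
  | zero => rfl
  | succ d ih => simp [dec, ih, List.replicate_succ]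

lemma encT_dec {M : Int} (hM : 1 ≤ M) (d : Nat) : ∀ {j : Nat}, j < M.toNat ^ d →
    encT M (dec M d j) = j := by
  induction d with
  | zero =>
    intro j hj
    have : j = 0 := by simpa using hj
    subst this; rfl
  | succ d ih =>
    intro j hj
    have hm : 0 < M.toNat := by omega
    have h1 : j / M.toNat < M.toNat ^ d := by
      rw [Nat.div_lt_iff_lt_mul hm]
      calc j < M.toNat ^ (d + 1) := hj
        _ = M.toNat ^ d * M.toNat := by ring
    simp only [dec, encT, ih h1]
    have h3 : ((((j % M.toNat : Nat) : Int) + 1 - 1)).toNat = j % M.toNat := by omega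
    rw [h3]
    exact Nat.mod_add_div j M.toNat

lemma encT_lt {M : Int} (hM : 1 ≤ M) {t : List Int} (ht : okT M t) :
    encT M t < M.toNat ^ t.length := by
  induction t with
  | nil => simp [encT]
  | cons x r ih =>
    have hx := ht x (List.mem_cons_self ..)
    have hr : okT M r := fun y hy => ht y (List.mem_cons_of_mem _ hy)
    have h2 := ih hr
    have hm : 0 < M.toNat := by omega
    have hxd : (x - 1).toNat < M.toNat := by omega
    have key : M.toNat * (encT M r + 1) ≤ M.toNat * M.toNat ^ r.length :=
      Nat.mul_le_mul_left _ (by omega)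
    have e1 : M.toNat * (encT M r + 1) = M.toNat * encT M r + M.toNat := by ring
    have e2 : M.toNat ^ (r.length + 1) = M.toNat * M.toNat ^ r.length := by ring
    simp only [encT, List.length_cons]
    omega

lemma dec_encT {M : Int} (hM : 1 ≤ M) {t : List Int} (ht : okT M t) :
    dec M t.length (encT M t) = t := by
  induction t with
  | nil => rfl
  | cons x r ih =>
    have hx := ht x (List.mem_cons_self ..)
    have hr : okT M r := fun y hy => ht y (List.mem_cons_of_mem _ hy)
    have hm : 0 < M.toNat := by omega
    have hxd : (x - 1).toNat < M.toNat := by omega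
    have hmod : ((x - 1).toNat + M.toNat * encT M r) % M.toNat = (x - 1).toNat := by
      rw [Nat.add_mul_mod_self_left]
      exact Nat.mod_eq_of_lt hxd
    have hdiv : ((x - 1).toNat + M.toNat * encT M r) / M.toNat = encT M r := by
      rw [Nat.add_mul_div_left _ _ hm, Nat.div_eq_of_lt hxd]
      omega
    simp only [List.length_cons, dec, encT, hmod, hdiv, ih hr]
    congr 1
    omega

lemma allM_iff_encT {M : Int} (hM : 1 ≤ M) {t : List Int} (ht : okT M t) :
    t.all (· == M) = true ↔ encT M t = M.toNat ^ t.length - 1 := by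
  induction t with
  | nil => simp [encT]
  | cons x r ih =>
    have hx := ht x (List.mem_cons_self ..)
    have hr : okT M r := fun y hy => ht y (List.mem_cons_of_mem _ hy)
    have h2 := encT_lt hM hr
    have hm : 0 < M.toNat := by omega
    have hmp : 0 < M.toNat ^ r.length := pow_pos hm _
    have hxd : (x - 1).toNat < M.toNat := by omega
    have hpow : M.toNat ^ (r.length + 1) = M.toNat * M.toNat ^ r.length := by ring
    have hmul : M.toNat * (M.toNat ^ r.length - 1) = M.toNat * M.toNat ^ r.length - M.toNat := by
      rw [Nat.mul_sub, Nat.mul_one]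
    have hle : M.toNat * encT M r ≤ M.toNat * (M.toNat ^ r.length - 1) :=
      Nat.mul_le_mul_left _ (by omega)
    simp only [List.all_cons, Bool.and_eq_true, ih hr, List.length_cons, encT, hpow, beq_iff_eq]
    rw [hmul] at hle
    have h6 : M.toNat ≤ M.toNat * M.toNat ^ r.length := Nat.le_mul_of_pos_right _ hmp
    constructor
    · rintro ⟨h1, h3⟩
      rw [h3, hmul] at *
      omega
    · intro h
      have h4 : M.toNat * encT M r = M.toNat * (M.toNat ^ r.length - 1) := by
        rw [hmul]; omega
      have h5 : encT M r = M.toNat ^ r.length - 1 := Nat.eq_of_mul_eq_mul_left hm h4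
      exact ⟨by omega, h5⟩

lemma dec_append {M : Int} (hM : 1 ≤ M) (d : Nat) : ∀ {j q : Nat},
    j < M.toNat ^ d → q < M.toNat →
    dec M (d + 1) (j + q * M.toNat ^ d) = dec M d j ++ [(q : Int) + 1] := by
  induction d with
  | zero =>
    intro j q hj hq
    have : j = 0 := by simpa using hj
    subst this
    simp [dec, Nat.mod_eq_of_lt hq, Nat.div_eq_of_lt hq]
  | succ d ih =>
    intro j q hj hq
    have hm : 0 < M.toNat := by omega
    have e1 : j + q * M.toNat ^ (d + 1) = j + (q * M.toNat ^ d) * M.toNat := by ring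
    have hmod : (j + (q * M.toNat ^ d) * M.toNat) % M.toNat = j % M.toNat := by
      simp [Nat.add_mul_mod_self_right]
    have hdiv : (j + (q * M.toNat ^ d) * M.toNat) / M.toNat = j / M.toNat + q * M.toNat ^ d := by
      rw [Nat.add_mul_div_right _ _ hm]
    have hj2 : j / M.toNat < M.toNat ^ d := by
      rw [Nat.div_lt_iff_lt_mul hm]
      calc j < M.toNat ^ (d + 1) := hj
        _ = M.toNat ^ d * M.toNat := by ring
    calc dec M (d + 1 + 1) (j + q * M.toNat ^ (d + 1))
        = (((j % M.toNat : Nat) : Int) + 1) :: dec M (d + 1) (j / M.toNat + q * M.toNat ^ d) := by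
          rw [e1]; simp only [dec, hmod, hdiv]
      _ = (((j % M.toNat : Nat) : Int) + 1) :: (dec M d (j / M.toNat) ++ [(q : Int) + 1]) := by
          rw [ih hj2 hq]
      _ = dec M (d + 1) j ++ [(q : Int) + 1] := by simp [dec]

lemma range_mul_flat (a b : Nat) :
    List.range (a * b) = (List.range a).flatMap (fun q => (List.range b).map (fun r => q * b + r)) := by
  induction a with
  | zero => simp
  | succ a ih =>
    have : (a + 1) * b = a * b + b := by ring
    rw [this, List.range_add, List.range_succ, List.flatMap_append, ← ih]
    simp

lemma tup_eq_map_dec {M : Int} (hM : 1 ≤ M) (d : Nat) :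
    tup M d = (List.range (M.toNat ^ d)).map (dec M d) := by
  induction d with
  | zero => simp [tup, dec]
  | succ d ih =>
    have hm : 0 < M.toNat := by omega
    have e1 : M.toNat ^ (d + 1) = M.toNat * M.toNat ^ d := by ring
    rw [tup, ih, e1, range_mul_flat, List.map_flatMap]
    apply List.flatMap_congr
    intro q hq
    have hq' : q < M.toNat := List.mem_range.mp hq
    rw [List.map_map, List.map_map]
    apply List.map_congr_left
    intro r hr
    have hr' : r < M.toNat ^ d := List.mem_range.mp hr
    have := dec_append hM d hr' hq'
    simp only [Function.comp]
    rw [show q * M.toNat ^ d + r = r + q * M.toNat ^ d from by ring, this]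

-- B side
lemma comps_nil : ∀ {p : Nat}, 1 ≤ p → ∀ {total : Int}, total < (p : Int) →
    comps total p = [] := by
  intro p
  induction p with
  | zero => omega
  | succ p ih =>
    intro _ total h
    match p with
    | 0 => simp [comps]; omega
    | p + 1 =>
      rw [comps]
      apply List.flatMap_eq_nil_iff.mpr
      intro k hk
      have hk1 : 1 ≤ k := (PySem.List.mem_pyRange_one.mp hk).1
      have : comps (total - k) (p + 1) = [] := by
        apply ih (by omega)
        push_cast
        omega
      simp [this]

lemma pyRange_one_map (e : Int) :
    PySem.List.pyRange 1 e = (List.range (e - 1).toNat).map (fun (q : Nat) => (q : Int) + 1) := by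
  have h : ∀ n : Nat, PySem.List.pyRange 1 ((n : Int) + 1) =
      (List.range n).map (fun (q : Nat) => (q : Int) + 1) := by
    intro n
    induction n with
    | zero => simp [PySem.List.pyRange_one_eq_nil]
    | succ n ih =>
      rw [show (((n + 1 : Nat) : Int) + 1) = ((n : Int) + 1) + 1 by push_cast; ring,
        PySem.List.pyRange_one_succ_right (by omega), ih, List.range_succ]
      simp
  by_cases he : 1 ≤ e
  · have h2 : e = ((e - 1).toNat : Int) + 1 := by omega
    rw [h2, h ((e - 1).toNat)]
    have h3 : (((e - 1).toNat : Int) + 1 - 1).toNat = (e - 1).toNat := by omega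
    rw [h3]
  · rw [PySem.List.pyRange_one_eq_nil (by omega)]
    have : (e - 1).toNat = 0 := by omega
    simp [this]

lemma filter_range_eq (total : Int) :
    ∀ m : Nat, (List.range m).filter (fun (q : Nat) => ((q : Int) + 1 == total)) =
      if 1 ≤ total ∧ total ≤ (m : Int) then [(total - 1).toNat] else [] := by
  intro m
  induction m with
  | zero =>
    rw [if_neg (by omega)]
    simp
  | succ m ih =>
    rw [List.range_succ, List.filter_append, ih]
    by_cases h1 : total = (m : Int) + 1
    · rw [if_neg (by omega), if_pos (by omega)]
      simp only [List.filter_cons, List.filter_nil]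
      rw [if_pos (by simp; omega)]
      simp
      omega
    · by_cases h2 : 1 ≤ total ∧ total ≤ (m : Int)
      · rw [if_pos h2, if_pos (by push_cast; omega)]
        simp only [List.filter_cons, List.filter_nil]
        rw [if_neg (by simp; omega)]
        simp
      · rw [if_neg h2, if_neg (by push_cast; omega)]
        simp only [List.filter_cons, List.filter_nil]
        rw [if_neg (by simp; omega)]
        simp

lemma comps_eq_filter_tup {M : Int} (hM : 1 ≤ M) : ∀ {p : Nat}, 1 ≤ p → ∀ {total : Int},
    total - (p : Int) + 1 ≤ M →
    comps total p = (tup M p).filter (fun t => t.sum == total) := by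
  intro p
  induction p with
  | zero => omega
  | succ p ih =>
    intro _ total h
    match p with
    | 0 =>
      show comps total 1 = _
      rw [comps, tup, tup]
      have e1 : (List.range M.toNat).flatMap
          (fun (q : Nat) => ([([] : List Int)]).map (fun t => t ++ [(q : Int) + 1])) =
          (List.range M.toNat).map (fun (q : Nat) => [(q : Int) + 1]) := by
        exact Eq.symm List.map_eq_flatMap
      rw [e1, List.filter_map]
      have e2 : ((fun t => List.sum t == total) ∘ fun (q : Nat) => [(q : Int) + 1]) =
          fun (q : Nat) => ((q : Int) + 1 == total) := by
        funext q; simp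
      rw [e2, filter_range_eq total M.toNat]
      have hMc : ((M.toNat : Int)) = M := by omega
      by_cases ht : 1 ≤ total
      · rw [if_pos ht, if_pos (by omega)]
        simp
        omega
      · rw [if_neg ht, if_neg (by omega)]
        simp
    | p + 1 =>
      rw [comps, tup, List.filter_flatMap]
      have inner : ∀ q ∈ List.range M.toNat,
          ((tup M (p + 1)).map (fun t => t ++ [(q : Int) + 1])).filter (fun t => t.sum == total) =
            ((comps (total - ((q : Int) + 1)) (p + 1)).map (fun c => c ++ [(q : Int) + 1])) := by
        intro q hq
        rw [List.filter_map]
        have e3 : ((fun t => List.sum t == total) ∘ fun t => t ++ [(q : Int) + 1]) =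
            fun (t : List Int) => (t.sum == total - ((q : Int) + 1)) := by
          funext t
          simp only [Function.comp, List.sum_append, List.sum_cons, List.sum_nil]
          apply Bool.eq_iff_iff.mpr
          simp only [beq_iff_eq]
          omega
        rw [e3, ← ih (by omega) (by push_cast; omega)]
      rw [List.flatMap_congr inner]
      rw [pyRange_one_map, List.flatMap_map]
      have e4 : (total - ((p : Int) + 2) + 2 - 1).toNat ≤ M.toNat := by omega
      rw [show M.toNat = (total - ((p : Int) + 2) + 2 - 1).toNat +
            (M.toNat - (total - ((p : Int) + 2) + 2 - 1).toNat) from by omega,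
        List.range_add, List.flatMap_append]
      have e5 : (List.map (fun x => (total - ((p : Int) + 2) + 2 - 1).toNat + x)
            (List.range (M.toNat - (total - ((p : Int) + 2) + 2 - 1).toNat))).flatMap
            (fun (q : Nat) => (comps (total - ((q : Int) + 1)) (p + 1)).map
              (fun c => c ++ [(q : Int) + 1])) = [] := by
        apply List.flatMap_eq_nil_iff.mpr
        intro t ht
        simp only [List.mem_map] at ht
        obtain ⟨r, hr, hrt⟩ := ht
        subst hrt
        have h9 : comps (total - ((((total - ((p : Int) + 2) + 2 - 1).toNat + r : Nat) : Int) + 1))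
            (p + 1) = [] := by
          apply comps_nil (by omega)
          push_cast
          omega
        rw [h9]
        simp
      rw [e5, List.append_nil]

-- A side: the carry scan
lemma carryGo_noop (M : Int) (len : Nat) :
    ∀ i (m : List Int), (∀ j, i ≤ j → j < len → m.getD j 0 ≤ M) → carryGo M len i m = m := by
  intro i
  induction' hn : len - i using Nat.strong_induction_on with n ih generalizing i
  intro m hm
  rw [carryGo]
  by_cases hi : i < len
  · rw [if_pos hi, if_neg (by push_neg; exact hm i le_rfl hi)]
    exact ih (len - (i + 1)) (by omega) (i + 1) rfl m (fun j h1 h2 => hm j (by omega) h2)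
  · rw [if_neg hi]

lemma getD_rep_app (i k : Nat) (s : List Int) :
    (List.replicate i (1 : Int) ++ s).getD (i + k) 0 = s.getD k 0 := by
  rw [List.getD_append_right _ _ _ _ (by simp)]
  simp

lemma carryGo_prop (M : Int) :
    ∀ (n : Nat) (s : List Int) (i : Nat), s.length = n → 1 ≤ s.headD 1 →
      (∀ x ∈ s.tail, 1 ≤ x ∧ (M < 1 ∨ x ≤ M)) →
      carryGo M (i + s.length) i (List.replicate i 1 ++ s) = List.replicate i 1 ++ propC M s := by
  intro n
  induction n with
  | zero =>
    intro s i hs _ _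
    have : s = [] := List.eq_nil_of_length_eq_zero hs
    subst this
    rw [carryGo]
    simp [propC]
  | succ n ih =>
    intro s i hs hhead htail
    have hget : (List.replicate i (1 : Int) ++ s).getD i 0 = s.getD 0 0 := by
      simpa using getD_rep_app i 0 s
    match s with
    | [x] =>
      rw [carryGo, if_pos (by simp)]
      by_cases hx : x > M
      · rw [if_pos (by rw [hget]; exact hx)]
        rw [if_neg (by simp)]
        have hdrop : ((List.replicate i (1 : Int) ++ [x]).drop i) = [x] := by
          have := List.drop_length_add_append (l₁ := List.replicate i (1 : Int)) 0 (l₂ := [x])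
          simpa using this
        rw [hdrop]
        rw [carryGo, if_neg (by simp)]
        simp [propC]
      · rw [if_neg (by rw [hget]; exact hx)]
        rw [carryGo, if_neg (by simp)]
        simp [propC]
    | x :: y :: r =>
      rw [carryGo, if_pos (by simp)]
      by_cases hx : x > M
      · rw [if_pos (by rw [hget]; exact hx)]
        rw [if_pos (by simp)]
        have hgety : (List.replicate i (1 : Int) ++ x :: y :: r).getD (i + 1) 0 = y := by
          simpa using getD_rep_app i 1 (x :: y :: r)
        rw [hgety]
        have hset : ((List.replicate i (1 : Int) ++ x :: y :: r).set (i + 1) (y + 1)).set i 1 =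
            List.replicate (i + 1) (1 : Int) ++ (y + 1) :: r := by
          rw [List.set_append, if_neg (by simp)]
          have e1 : i + 1 - (List.replicate i (1 : Int)).length = 1 := by simp
          rw [e1]
          show ((List.replicate i (1 : Int) ++ x :: (y + 1) :: r)).set i 1 = _
          rw [List.set_append, if_neg (by simp)]
          have e2 : i - (List.replicate i (1 : Int)).length = 0 := by simp
          rw [e2]
          show List.replicate i (1 : Int) ++ 1 :: (y + 1) :: r = _
          rw [List.replicate_succ', List.append_assoc]
          rfl
        rw [hset]
        have hdrop : List.replicate i (1 : Int) ++
              ((List.replicate (i + 1) (1 : Int) ++ (y + 1) :: r).drop i) =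
            List.replicate (i + 1) (1 : Int) ++ (y + 1) :: r := by
          rw [List.replicate_succ', List.append_assoc]
          have := List.drop_length_add_append (l₁ := List.replicate i (1 : Int)) 0
            (l₂ := [(1 : Int)] ++ (y + 1) :: r)
          simp only [Nat.add_zero, List.drop_zero, List.length_replicate] at this
          rw [this]
        rw [hdrop]
        have hlen : i + (x :: y :: r).length = (i + 1) + ((y + 1) :: r).length := by
          simp
          omega
        rw [hlen]
        have htail' : ∀ z ∈ ((y + 1) :: r).tail, 1 ≤ z ∧ (M < 1 ∨ z ≤ M) := by
          intro z hz
          exact htail z (by simp at hz ⊢; right; exact hz)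
        have hhead' : 1 ≤ ((y + 1) :: r).headD 1 := by
          have := htail y (by simp)
          simp
          omega
        rw [ih ((y + 1) :: r) (i + 1) (by simp at hs ⊢; omega) hhead' htail']
        rw [List.replicate_succ', List.append_assoc]
        simp [propC, if_pos hx]
      · rw [if_neg (by rw [hget]; exact hx)]
        have hnoop : carryGo M (i + (x :: y :: r).length) (i + 1)
            (List.replicate i 1 ++ x :: y :: r) = List.replicate i 1 ++ x :: y :: r := by
          apply carryGo_noop
          intro j h1 h2
          have hM1 : 1 ≤ M := by
            have : 1 ≤ x := by simpa using hhead
            omega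
          have hj : j = i + ((j - i - 1) + 1) := by omega
          rw [hj, getD_rep_app]
          have hlt : (j - i - 1) + 1 < (x :: y :: r).length := by simp at h2 ⊢; omega
          rw [List.getD_eq_getElem _ _ hlt]
          simp only [List.getElem_cons_succ]
          have hlt2 : j - i - 1 < (y :: r).length := by simp at hlt ⊢; omega
          have hmem : (y :: r)[j - i - 1]'hlt2 ∈ y :: r := List.getElem_mem hlt2
          have := (htail _ hmem).2
          omega
        rw [hnoop]
        simp [propC, if_neg hx]

lemma getLastD_mem (l : List Int) (h : l ≠ []) : l.getLastD 0 ∈ l := by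
  rw [List.getLastD_eq_getLast?, List.getLast?_eq_getLast_of_ne_nil h]
  exact List.getLast_mem h

lemma propC_low {M : Int} (hM : M ≤ 0) :
    ∀ k : Nat, propC M (2 :: List.replicate k 1) = List.replicate k 1 ++ [2] := by
  intro k
  induction k with
  | zero => simp [propC]
  | succ k ih =>
    rw [List.replicate_succ, propC, if_pos (by omega)]
    norm_num at ih ⊢
    rw [ih]

lemma propC_bump {M : Int} (hM : 1 ≤ M) :
    ∀ (r : List Int) (x : Int), okT M (x :: r) →
      propC M ((x + 1) :: r) =
        if (x :: r).all (· == M) then List.replicate r.length 1 ++ [M + 1]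
        else dec M (x :: r).length (encT M (x :: r) + 1) := by
  intro r
  induction r with
  | nil =>
    intro x hok
    have hx := hok x (by simp)
    have hm : 0 < M.toNat := by omega
    by_cases hxM : x = M
    · rw [if_pos (by simp [hxM])]
      subst hxM
      simp [propC]
    · rw [if_neg (by simp; omega)]
      simp only [List.length_cons, List.length_nil, dec, encT, propC]
      have e0 : (x - 1).toNat + M.toNat * 0 + 1 = (x - 1).toNat + 1 := by omega
      rw [e0, Nat.mod_eq_of_lt (by omega)]
      congr 1
      omega
  | cons y r' ih =>
    intro x hok
    have hx := hok x (by simp)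
    have hy := hok y (by simp)
    have hokr : okT M (y :: r') := fun z hz => hok z (List.mem_cons_of_mem _ hz)
    have hm : 0 < M.toNat := by omega
    by_cases hxM : x = M
    · rw [propC, if_pos (by omega), ih y hokr]
      have hmod : (M.toNat * (encT M (y :: r') + 1)) % M.toNat = 0 := by
        simp [Nat.mul_mod_right]
      have hdiv : (M.toNat * (encT M (y :: r') + 1)) / M.toNat = encT M (y :: r') + 1 :=
        Nat.mul_div_cancel_left _ hm
      have hmm : M.toNat * (encT M (y :: r') + 1) = M.toNat * encT M (y :: r') + M.toNat := by
        ring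
      have he : encT M (x :: y :: r') + 1 = M.toNat * (encT M (y :: r') + 1) := by
        rw [show encT M (x :: y :: r') = (x - 1).toNat + M.toNat * encT M (y :: r') from rfl]
        have hx1 : (x - 1).toNat = M.toNat - 1 := by omega
        omega
      by_cases hall : (y :: r').all (· == M) = true
      · rw [if_pos hall, if_pos (by
          simp only [List.all_cons, Bool.and_eq_true, beq_iff_eq] at hall ⊢
          exact ⟨hxM, hall⟩)]
        simp [List.replicate_succ]
      · rw [if_neg hall, if_neg (by
          simp only [List.all_cons, Bool.and_eq_true, beq_iff_eq] at hall ⊢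
          intro hc
          exact hall ⟨hc.2.1, hc.2.2⟩)]
        simp only [List.length_cons]
        rw [he, show dec M (r'.length + 1 + 1) (M.toNat * (encT M (y :: r') + 1)) =
          ((((M.toNat * (encT M (y :: r') + 1)) % M.toNat : Nat) : Int) + 1) ::
            dec M (r'.length + 1) ((M.toNat * (encT M (y :: r') + 1)) / M.toNat) from rfl]
        rw [hmod, hdiv]
        norm_num
    · rw [propC, if_neg (by omega)]
      rw [if_neg (by simp; intro h; omega)]
      have he : encT M (x :: y :: r') + 1 = ((x - 1).toNat + 1) + M.toNat * encT M (y :: r') := by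
        simp only [encT]; omega
      have hlt : (x - 1).toNat + 1 < M.toNat := by omega
      have hmod : (((x - 1).toNat + 1) + M.toNat * encT M (y :: r')) % M.toNat
          = (x - 1).toNat + 1 := by
        rw [Nat.add_mul_mod_self_left, Nat.mod_eq_of_lt hlt]
      have hdiv : (((x - 1).toNat + 1) + M.toNat * encT M (y :: r')) / M.toNat
          = encT M (y :: r') := by
        rw [Nat.add_mul_div_left _ _ hm, Nat.div_eq_of_lt hlt]
        omega
      have hdr : dec M (y :: r').length (encT M (y :: r')) = y :: r' := dec_encT hM hokr
      simp only [List.length_cons] at hdr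
      simp only [List.length_cons]
      rw [he, show dec M (r'.length + 1 + 1) ((x - 1).toNat + 1 + M.toNat * encT M (y :: r')) =
        (((((x - 1).toNat + 1 + M.toNat * encT M (y :: r')) % M.toNat : Nat) : Int) + 1) ::
          dec M (r'.length + 1) (((x - 1).toNat + 1 + M.toNat * encT M (y :: r')) / M.toNat)
          from rfl]
      rw [hmod, hdiv, hdr]
      congr 1
      omega

lemma isAbsorbedA_false {t : List Int} (h : ∀ x ∈ t, 1 ≤ x) : isAbsorbedA t = false := by
  induction t with
  | nil => rfl
  | cons x r ih =>
    rw [isAbsorbedA, if_neg (by have := h x (by simp); omega)]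
    exact ih (fun z hz => h z (List.mem_cons_of_mem _ hz))

lemma isInLevelA_of_ok {level dimension : Int} {M : Int} (hM : 1 ≤ M)
    {t : List Int} (ht : okT M t) (hl : (t.length : Int) = dimension) :
    isInLevelA t level dimension = (t.sum == level) := by
  have habs : isAbsorbedA t = false := isAbsorbedA_false (fun x hx => (ht x hx).1)
  by_cases hs : t.sum = level
  · simp [isInLevelA, hl, habs, hs]
  · simp [isInLevelA, hl, habs, hs]

-- one unfolding of loopA's successor case (definitional)
lemma loopA_succ (level dimension : Int) (f : Nat) (x : Int) (t : List Int)
    (acc : List (List Int)) :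
    loopA level dimension (f + 1) (x :: t) acc =
      (if (carryGo (level - dimension + 1) ((x + 1) :: t).length 0
            ((x + 1) :: t)).getLastD 0 > level - dimension + 1 then
        (if isInLevelA (x :: t) level dimension then acc ++ [x :: t] else acc)
      else loopA level dimension f
        (carryGo (level - dimension + 1) ((x + 1) :: t).length 0 ((x + 1) :: t))
        (if isInLevelA (x :: t) level dimension then acc ++ [x :: t] else acc)) := rfl

lemma loopA_eq {level dimension : Int} (hd : 1 ≤ dimension)
    (hM : 1 ≤ level - dimension + 1) :
    ∀ (f j : Nat) (acc : List (List Int)),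
      j < (level - dimension + 1).toNat ^ dimension.toNat →
      (level - dimension + 1).toNat ^ dimension.toNat - j ≤ f →
      loopA level dimension f (dec (level - dimension + 1) dimension.toNat j) acc =
        acc ++ ((List.range' j ((level - dimension + 1).toNat ^ dimension.toNat - j)).map
            (dec (level - dimension + 1) dimension.toNat)).filter
          (fun t => isInLevelA t level dimension) := by
  intro f
  induction f with
  | zero => intro j acc hj hf; omega
  | succ f ih =>
    intro j acc hj hf
    have hm : 0 < (level - dimension + 1).toNat := by omega
    have hd1 : 1 ≤ dimension.toNat := by omega
    obtain ⟨d', hd'⟩ : ∃ d', dimension.toNat = d' + 1 := ⟨dimension.toNat - 1, by omega⟩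
    have hn : dec (level - dimension + 1) dimension.toNat j =
        (((j % (level - dimension + 1).toNat : Nat) : Int) + 1) ::
          dec (level - dimension + 1) d' (j / (level - dimension + 1).toNat) := by
      rw [hd']; rfl
    have hokn : okT (level - dimension + 1) (dec (level - dimension + 1) dimension.toNat j) :=
      dec_ok hM dimension.toNat j
    have hok2 : okT (level - dimension + 1)
        ((((j % (level - dimension + 1).toNat : Nat) : Int) + 1) ::
          dec (level - dimension + 1) d' (j / (level - dimension + 1).toNat)) := by
      rw [← hn]; exact hokn
    have hlent : (dec (level - dimension + 1) d' (j / (level - dimension + 1).toNat)).length = d' :=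
      dec_length _ _ _
    rw [hn, loopA_succ]
    have hcarry : carryGo (level - dimension + 1)
        (((((j % (level - dimension + 1).toNat : Nat) : Int) + 1 + 1) ::
          dec (level - dimension + 1) d' (j / (level - dimension + 1).toNat)).length) 0
        ((((j % (level - dimension + 1).toNat : Nat) : Int) + 1 + 1) ::
          dec (level - dimension + 1) d' (j / (level - dimension + 1).toNat)) =
        propC (level - dimension + 1)
          ((((j % (level - dimension + 1).toNat : Nat) : Int) + 1 + 1) ::
            dec (level - dimension + 1) d' (j / (level - dimension + 1).toNat)) := by
      have := carryGo_prop (level - dimension + 1) _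
        ((((j % (level - dimension + 1).toNat : Nat) : Int) + 1 + 1) ::
          dec (level - dimension + 1) d' (j / (level - dimension + 1).toNat)) 0 rfl
        (by
          show (1 : Int) ≤ ((j % (level - dimension + 1).toNat : Nat) : Int) + 1 + 1
          omega)
        (by
          intro z hz
          have := dec_ok hM d' (j / (level - dimension + 1).toNat) z (by simpa using hz)
          exact ⟨this.1, Or.inr this.2⟩)
      simpa using this
    rw [hcarry, propC_bump hM _ _ hok2]
    have henc : encT (level - dimension + 1)
        ((((j % (level - dimension + 1).toNat : Nat) : Int) + 1) ::
          dec (level - dimension + 1) d' (j / (level - dimension + 1).toNat)) = j := by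
      rw [← hn]; exact encT_dec hM dimension.toNat hj
    have hlen2 : ((((j % (level - dimension + 1).toNat : Nat) : Int) + 1) ::
        dec (level - dimension + 1) d' (j / (level - dimension + 1).toNat)).length =
        dimension.toNat := by
      simp [hlent, hd']
    by_cases hlast : j = (level - dimension + 1).toNat ^ dimension.toNat - 1
    · have hall : ((((j % (level - dimension + 1).toNat : Nat) : Int) + 1) ::
          dec (level - dimension + 1) d' (j / (level - dimension + 1).toNat)).all
            (· == (level - dimension + 1)) = true := by
        apply (allM_iff_encT hM hok2).mpr
        rw [henc, hlen2]
        exact hlast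
      rw [if_pos hall]
      rw [show (List.replicate (dec (level - dimension + 1) d'
            (j / (level - dimension + 1).toNat)).length (1 : Int) ++
            [level - dimension + 1 + 1]).getLastD 0 = level - dimension + 1 + 1 from
        List.getLastD_concat ..]
      rw [if_pos (by omega)]
      have h1 : (level - dimension + 1).toNat ^ dimension.toNat - j = 1 := by omega
      rw [h1, List.range'_one, List.map_cons, List.map_nil, List.filter_cons, List.filter_nil]
      rw [hn]
      by_cases hp : isInLevelA
          ((((j % (level - dimension + 1).toNat : Nat) : Int) + 1) ::
            dec (level - dimension + 1) d' (j / (level - dimension + 1).toNat)) level dimension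
      · rw [if_pos hp, if_pos hp]
      · rw [if_neg hp, if_neg (by simpa using hp)]
        simp
    · have hnall : ¬ ((((j % (level - dimension + 1).toNat : Nat) : Int) + 1) ::
          dec (level - dimension + 1) d' (j / (level - dimension + 1).toNat)).all
            (· == (level - dimension + 1)) = true := by
        intro hc
        have := (allM_iff_encT hM hok2).mp hc
        rw [henc, hlen2] at this
        exact hlast this
      rw [if_neg hnall, henc, hlen2]
      have hne : dec (level - dimension + 1) dimension.toNat (j + 1) ≠ [] := by
        intro hcon
        have := dec_length (level - dimension + 1) dimension.toNat (j + 1)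
        rw [hcon] at this
        simp at this
        omega
      have hlastmem := dec_ok hM dimension.toNat (j + 1) _ (getLastD_mem _ hne)
      rw [if_neg (by omega)]
      have hjpow : j + 1 < (level - dimension + 1).toNat ^ dimension.toNat := by omega
      rw [ih (j + 1) _ hjpow (by omega)]
      have hsplit : (level - dimension + 1).toNat ^ dimension.toNat - j =
          ((level - dimension + 1).toNat ^ dimension.toNat - (j + 1)) + 1 := by omega
      rw [hsplit, List.range'_succ, List.map_cons, List.filter_cons]
      rw [hn]
      by_cases hp : isInLevelA
          ((((j % (level - dimension + 1).toNat : Nat) : Int) + 1) ::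
            dec (level - dimension + 1) d' (j / (level - dimension + 1).toNat)) level dimension
      · rw [if_pos hp, if_pos hp]
        simp
      · rw [if_neg hp, if_neg (by simpa using hp)]

-- the M ≤ 0 case: the loop breaks after its first iteration, collecting nothing
lemma loopA_low {level dimension : Int} (hd : 1 ≤ dimension)
    (hM : level - dimension + 1 ≤ 0) (f : Nat) :
    loopA level dimension (f + 1) (List.replicate dimension.toNat 1) [] = [] := by
  obtain ⟨d', hd'⟩ : ∃ d', dimension.toNat = d' + 1 := ⟨dimension.toNat - 1, by omega⟩
  rw [hd', List.replicate_succ, loopA_succ]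
  have hsum : (1 :: List.replicate d' (1 : Int)).sum = ((d' : Int) + 1) := by
    simp [List.sum_replicate]
    ring
  have hin : isInLevelA (1 :: List.replicate d' 1) level dimension = false := by
    rw [isInLevelA, if_pos]
    apply Bool.or_eq_true_iff.mpr
    left
    apply Bool.or_eq_true_iff.mpr
    right
    rw [hsum]
    simp only [bne_iff_ne, ne_eq]
    omega
  rw [hin]
  have hcarry : carryGo (level - dimension + 1) ((1 + 1 : Int) :: List.replicate d' 1).length 0
      ((1 + 1 : Int) :: List.replicate d' 1) =
      propC (level - dimension + 1) ((1 + 1 : Int) :: List.replicate d' 1) := by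
    have := carryGo_prop (level - dimension + 1) _
      ((1 + 1 : Int) :: List.replicate d' 1) 0 rfl (by simp)
      (by
        intro z hz
        have : z = 1 := by
          simp at hz
          omega
        subst this
        exact ⟨le_rfl, Or.inl (by omega)⟩)
    simpa using this
  rw [hcarry]
  rw [show ((1 + 1 : Int) :: List.replicate d' 1) = ((2 : Int) :: List.replicate d' 1) from by
    norm_num]
  rw [propC_low hM d']
  rw [List.getLastD_concat]
  rw [if_pos (by omega)]
  simp

-- ===== VERDICT (by name: the statement is the Claim_ definition above) =====
theorem levelStates_spec : Claim_equal_levelStates := by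
  intro level dimension hdom hpre
  unfold Spec_levelStates
  have hd : 1 ≤ dimension := hpre
  have hd1 : 1 ≤ dimension.toNat := by omega
  have hcast : ((dimension.toNat : Int)) = dimension := by omega
  by_cases hM : 1 ≤ level - dimension + 1
  · have hm : 0 < (level - dimension + 1).toNat := by omega
    have hpow : 0 < (level - dimension + 1).toNat ^ dimension.toNat := pow_pos hm _
    unfold levelStates
    rw [← dec_zero hM dimension.toNat]
    rw [loopA_eq hd hM _ 0 [] hpow (by omega)]
    simp only [Nat.sub_zero, List.nil_append]
    rw [← List.range_eq_range', ← tup_eq_map_dec hM]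
    have hcong : ∀ t ∈ tup (level - dimension + 1) dimension.toNat,
        isInLevelA t level dimension = (t.sum == level) := by
      intro t htm
      rw [tup_eq_map_dec hM] at htm
      obtain ⟨jj, hjj, rfl⟩ := List.mem_map.mp htm
      exact isInLevelA_of_ok hM (dec_ok hM _ _) (by rw [dec_length]; exact hcast)
    rw [List.filter_congr hcong]
    unfold levelStates_alt
    rw [comps_eq_filter_tup hM hd1 (by omega)]
  · unfold levelStates levelStates_alt
    have h0 : (level - dimension + 1).toNat = 0 := by omega
    rw [h0, Nat.zero_pow (by omega)]
    rw [loopA_low hd (by omega) 0]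
    rw [comps_nil hd1 (by omega)]
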